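-- pv_equiv track=rewrite | github.com/lsh23/algorithm-exercise | 시뮬레이션/다리만들기2.py | get_island_cnt
-- ===== SOURCE A (Python) =====
-- from collections import deque
--
-- dy = [0, -1, 0, 1]
--
-- dx = [1, 0, -1, 0]
--
-- def get_island_cnt(map_info: list[list[int]], n: int, m: int) -> int:
--     visited: list[list[int]] = [[0] * m for _ in range(n)]
--     island_cnt: int = 0
--     for i in range(n):
--         for j in range(m):
--             if map_info[i][j] == 1 and visited[i][j] == 0:
--                 island_cnt += 1
--                 q: deque[int] = deque()
--                 q.append((i, j))
--                 map_info[i][j] = island_cnt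
--                 visited[i][j] = 1
--                 while q:
--                     y, x = q.popleft()
--                     for k in range(4):
--                         ny = y + dy[k]
--                         nx = x + dx[k]
--                         if ny < 0 or ny >= n or nx < 0 or nx >= m:
--                             continue
--                         if visited[ny][nx] != 0:
--                             continue
--                         if map_info[ny][nx] == 0:
--                             continue
--                         visited[ny][nx] = 1
--                         map_info[ny][nx] = island_cnt
--                         q.append((ny, nx))
--     return island_cnt
-- ===== SOURCE B (Python) =====
-- def get_island_cnt(map_info: list[list[int]], n: int, m: int) -> int:
--     # Union-find keyed by cell coordinates: union each nonzero cell with its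
--     # right/down nonzero neighbours, then count the distinct roots of the
--     # value-1 cells.  (Return value only: unlike the BFS version this does
--     # not relabel map_info.)
--     parent: dict[tuple[int, int], tuple[int, int]] = {}
--
--     def find(a):
--         while parent.get(a, a) != a:
--             a = parent[a]
--         return a
--
--     def union(a, b):
--         ra, rb = find(a), find(b)
--         if ra != rb:
--             parent[ra] = rb
--
--     for i in range(n):
--         for j in range(m):
--             if map_info[i][j] != 0:
--                 if j + 1 < m and map_info[i][j + 1] != 0:
--                     union((i, j), (i, j + 1))
--                 if i + 1 < n and map_info[i + 1][j] != 0: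
--                     union((i, j), (i + 1, j))
--
--     return len({find((i, j)) for i in range(n) for j in range(m)
--                 if map_info[i][j] == 1})
-- ===== Notes on version B (the rewrite author's own statement) =====
-- stated objective: alternative
-- what changed: Replaces the mutating BFS flood fill (queue + visited matrix + in-place relabeling of map_info) by a union-find keyed by cell coordinates: one scan unions each nonzero cell with its right/down nonzero neighbours, then the distinct roots of the value-1 cells are counted; equivalence is about the return value only (A relabels map_info in place, B does not mutate it). Pre_ excludes only grids too short or ragged for the n-by-m scan, on which A raises IndexError.
import Mathlib
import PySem

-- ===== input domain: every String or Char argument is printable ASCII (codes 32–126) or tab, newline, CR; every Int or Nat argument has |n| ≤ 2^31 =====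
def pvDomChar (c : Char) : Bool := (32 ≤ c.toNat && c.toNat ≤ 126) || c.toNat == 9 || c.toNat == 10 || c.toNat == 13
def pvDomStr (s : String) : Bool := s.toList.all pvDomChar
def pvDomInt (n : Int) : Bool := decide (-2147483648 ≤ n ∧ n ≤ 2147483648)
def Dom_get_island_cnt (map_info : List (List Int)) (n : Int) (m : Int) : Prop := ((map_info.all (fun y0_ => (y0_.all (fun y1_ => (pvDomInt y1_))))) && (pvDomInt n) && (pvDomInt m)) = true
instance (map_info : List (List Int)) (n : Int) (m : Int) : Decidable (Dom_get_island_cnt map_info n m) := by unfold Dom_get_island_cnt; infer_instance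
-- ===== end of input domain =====

-- B replaces A's mutating BFS flood fill (queue + visited matrix + relabeling of map_info)
-- by a union-find keyed by cell coordinates (union right/down nonzero neighbours, then count
-- distinct roots of the value-1 cells); equivalence is about the RETURN value only:
-- A relabels map_info in place, B does not mutate it.

-- ===== PORT A =====
-- shared tiny indexing helpers for 2-d list access/assignment (reads/writes are in range under Pre_)
def get2d (g : List (List Int)) (i j : Int) : Int :=
  PySem.List.pyGetD (PySem.List.pyGetD g i []) j 0

def set2d (g : List (List Int)) (i j v : Int) : List (List Int) :=
  g.set i.toNat ((g.getD i.toNat []).set j.toNat v)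

def dyA : List Int := [0, -1, 0, 1]
def dxA : List Int := [1, 0, -1, 0]

-- body of 'for k in range(4)': try direction k from (y, x); state = (q, visited, map_info)
def stepDir (n m island_cnt y x : Int)
    (st : List (Int × Int) × List (List Int) × List (List Int)) (k : Int) :
    List (Int × Int) × List (List Int) × List (List Int) :=
  let ny := y + PySem.List.pyGetD dyA k 0
  let nx := x + PySem.List.pyGetD dxA k 0
  if ny < 0 ∨ n ≤ ny ∨ nx < 0 ∨ m ≤ nx then st
  else if get2d st.2.1 ny nx ≠ 0 then st
  else if get2d st.2.2 ny nx = 0 then st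
  else (st.1 ++ [(ny, nx)], set2d st.2.1 ny nx 1, set2d st.2.2 ny nx island_cnt)

-- 'while q:' — fuel only makes the loop total; it never runs out on admitted inputs
def bfsLoop (n m island_cnt : Int) :
    Nat → List (Int × Int) × List (List Int) × List (List Int) →
    List (List Int) × List (List Int)
  | 0, (_, vis, mp) => (vis, mp)
  | _ + 1, ([], vis, mp) => (vis, mp)
  | fuel + 1, ((y, x) :: q, vis, mp) =>
    bfsLoop n m island_cnt fuel
      ((PySem.List.pyRange 0 4 1).foldl (stepDir n m island_cnt y x) (q, vis, mp))

-- body of the inner 'for j in range(m)': state = (island_cnt, visited, map_info)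
def cellStepA (n m i : Int) (st : Int × List (List Int) × List (List Int)) (j : Int) :
    Int × List (List Int) × List (List Int) :=
  if get2d st.2.2 i j = 1 ∧ get2d st.2.1 i j = 0 then
    let cnt := st.1 + 1
    let mp := set2d st.2.2 i j cnt
    let vis := set2d st.2.1 i j 1
    let r := bfsLoop n m cnt (5 * (n.toNat * m.toNat) + 5) ([(i, j)], vis, mp)
    (cnt, r.1, r.2)
  else st

def get_island_cnt (map_info : List (List Int)) (n : Int) (m : Int) : Int :=
  let visited := List.replicate n.toNat (List.replicate m.toNat (0 : Int))
  ((PySem.List.pyRange 0 n 1).foldl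
    (fun st i => (PySem.List.pyRange 0 m 1).foldl (cellStepA n m i) st)
    (0, visited, map_info)).1

-- ===== PORT B =====
-- 'find(a)': while parent.get(a, a) != a: a = parent[a] — fuel only makes the loop total
def ufFind (parent : PySem.Dict (Int × Int) (Int × Int)) :
    Nat → (Int × Int) → (Int × Int)
  | 0, a => a
  | fuel + 1, a =>
    if PySem.Dict.getD parent a a ≠ a then ufFind parent fuel (PySem.Dict.getD parent a a)
    else a

-- 'union(a, b)'
def ufUnion (parent : PySem.Dict (Int × Int) (Int × Int)) (a b : Int × Int) :
    PySem.Dict (Int × Int) (Int × Int) :=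
  let ra := ufFind parent (parent.size + 1) a
  let rb := ufFind parent (parent.size + 1) b
  if ra ≠ rb then parent.insert ra rb else parent

-- body of the inner 'for j in range(m)' of the union scan
def unionStepB (mi : List (List Int)) (n m i : Int)
    (parent : PySem.Dict (Int × Int) (Int × Int)) (j : Int) :
    PySem.Dict (Int × Int) (Int × Int) :=
  if get2d mi i j ≠ 0 then
    let p1 := if j + 1 < m ∧ get2d mi i (j + 1) ≠ 0 then ufUnion parent (i, j) (i, j + 1)
              else parent
    if i + 1 < n ∧ get2d mi (i + 1) j ≠ 0 then ufUnion p1 (i, j) (i + 1, j) else p1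
  else parent

-- body of the set comprehension {find((i, j)) for i … for j … if map_info[i][j] == 1}
def rootStepB (mi : List (List Int)) (parent : PySem.Dict (Int × Int) (Int × Int)) (i : Int)
    (s : PySem.Set (Int × Int)) (j : Int) : PySem.Set (Int × Int) :=
  if get2d mi i j = 1 then PySem.Set.add s (ufFind parent (parent.size + 1) (i, j)) else s

def get_island_cnt_alt (map_info : List (List Int)) (n : Int) (m : Int) : Int :=
  let parent := (PySem.List.pyRange 0 n 1).foldl
    (fun par i => (PySem.List.pyRange 0 m 1).foldl (unionStepB map_info n m i) par)
    PySem.Dict.empty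
  (((PySem.List.pyRange 0 n 1).foldl
    (fun s i => (PySem.List.pyRange 0 m 1).foldl (rootStepB map_info parent i) s)
    ([] : PySem.Set (Int × Int))).length : Int)

-- ===== PRECONDITION & SPEC =====
-- Pre_ excludes exactly the inputs on which the Python A raises IndexError:
-- when n > 0 and m > 0, A reads map_info[i][j] for every i < n, j < m, so map_info
-- must have at least n rows whose first n rows each have at least m entries.
def Pre_get_island_cnt (map_info : List (List Int)) (n : Int) (m : Int) : Prop :=
  0 < n → 0 < m →
    (n ≤ (map_info.length : Int) ∧ ∀ row ∈ map_info.take n.toNat, m ≤ (row.length : Int))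
instance (map_info : List (List Int)) (n : Int) (m : Int) :
    Decidable (Pre_get_island_cnt map_info n m) := by unfold Pre_get_island_cnt; infer_instance

def pvWitness_get_island_cnt : List (List Int) × Int × Int := ([[1, 0], [0, 1]], 2, 2)

def Spec_get_island_cnt (map_info : List (List Int)) (n : Int) (m : Int) (out : Int) : Prop :=
  out = get_island_cnt_alt map_info n m
instance (map_info : List (List Int)) (n : Int) (m : Int) (out : Int) :
    Decidable (Spec_get_island_cnt map_info n m out) := by unfold Spec_get_island_cnt; infer_instance

-- ===== CLAIM (what is proved, stated in full; the proofs are below) =====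
def Claim_equal_get_island_cnt : Prop := ∀ (map_info : List (List Int)) (n : Int) (m : Int), Dom_get_island_cnt map_info n m → Pre_get_island_cnt map_info n m → Spec_get_island_cnt map_info n m (get_island_cnt map_info n m)

-- ===== LEMMAS AND PROOFS =====

-- in-window positions
def inW (n m : Int) (p : Int × Int) : Prop := 0 ≤ p.1 ∧ p.1 < n ∧ 0 ≤ p.2 ∧ p.2 < m

def nbrsB (y x : Int) : List (Int × Int) := [(y, x + 1), (y - 1, x), (y, x - 1), (y + 1, x)]

-- one 4-connectivity step into a nonzero in-window cell (values of the ORIGINAL grid)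
def stepR (mi : List (List Int)) (n m : Int) (p q : Int × Int) : Prop :=
  inW n m q ∧ get2d mi q.1 q.2 ≠ 0 ∧ q ∈ nbrsB p.1 p.2

def reach (mi : List (List Int)) (n m : Int) (s p : Int × Int) : Prop :=
  Relation.ReflTransGen (stepR mi n m) s p

-- ---- small 2-d access lemmas ----
theorem get2d_nonneg (g : List (List Int)) (i j : Int) (hi : 0 ≤ i) (hj : 0 ≤ j) :
    get2d g i j = (g.getD i.toNat []).getD j.toNat 0 := by
  unfold get2d
  rw [PySem.List.pyGetD_of_nonneg g [] hi, PySem.List.pyGetD_of_nonneg _ 0 hj]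

theorem length_set2d (g : List (List Int)) (i j v : Int) :
    (set2d g i j v).length = g.length := by simp [set2d]

theorem getD_set2d (g : List (List Int)) (i j v : Int) (k : Nat) :
    ((set2d g i j v).getD k []) =
      if k = i.toNat ∧ i.toNat < g.length then (g.getD i.toNat []).set j.toNat v
      else g.getD k [] := by
  simp only [set2d, List.getD_eq_getElem?_getD, List.getElem?_set]
  split_ifs with h1 h2 h3 h4 <;> simp_all

theorem rowlen_set2d (g : List (List Int)) (i j v : Int) (k : Nat) :
    ((set2d g i j v).getD k []).length = (g.getD k []).length := by
  rw [getD_set2d]; split_ifs with h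
  · rw [List.length_set, h.1]
  · rfl

theorem get2d_set2d_same (g : List (List Int)) (i j v : Int) (hi : 0 ≤ i) (hj : 0 ≤ j)
    (hil : i.toNat < g.length) (hjl : j.toNat < (g.getD i.toNat []).length) :
    get2d (set2d g i j v) i j = v := by
  rw [get2d_nonneg _ _ _ hi hj, getD_set2d, if_pos ⟨rfl, hil⟩,
    List.getD_eq_getElem?_getD, List.getElem?_set_self (by simpa using hjl)]
  simp

theorem get2d_set2d_ne (g : List (List Int)) (i j v i' j' : Int) (hi : 0 ≤ i) (hj : 0 ≤ j)
    (hi' : 0 ≤ i') (hj' : 0 ≤ j') (hne : ¬ (i = i' ∧ j = j')) :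
    get2d (set2d g i j v) i' j' = get2d g i' j' := by
  rw [get2d_nonneg _ _ _ hi' hj', get2d_nonneg _ _ _ hi' hj', getD_set2d]
  split_ifs with h
  · have hii : i = i' := by omega
    have hjj : j ≠ j' := fun hjj => hne ⟨hii, hjj⟩
    rw [List.getD_eq_getElem?_getD, List.getD_eq_getElem?_getD, h.1,
      List.getElem?_set_ne (by omega)]
    simp [List.getD_eq_getElem?_getD]
  · rfl

-- ---- neighbour symmetry and reach facts ----
theorem nbrsB_symm (p q : Int × Int) : q ∈ nbrsB p.1 p.2 ↔ p ∈ nbrsB q.1 q.2 := by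
  rcases p with ⟨a, b⟩; rcases q with ⟨c, d⟩
  simp [nbrsB, Prod.ext_iff]; omega

theorem reach_props (mi : List (List Int)) (n m : Int) (s p : Int × Int)
    (hsW : inW n m s) (hs0 : get2d mi s.1 s.2 ≠ 0) (h : reach mi n m s p) :
    inW n m p ∧ get2d mi p.1 p.2 ≠ 0 := by
  induction h with
  | refl => exact ⟨hsW, hs0⟩
  | tail _ hstep _ => exact ⟨hstep.1, hstep.2.1⟩

theorem reach_symm (mi : List (List Int)) (n m : Int) (s p : Int × Int)
    (hsW : inW n m s) (hs0 : get2d mi s.1 s.2 ≠ 0) (h : reach mi n m s p) :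
    reach mi n m p s := by
  induction h with
  | refl => exact Relation.ReflTransGen.refl
  | @tail b c hb hstep ih =>
    have hbp := reach_props mi n m s b hsW hs0 hb
    exact Relation.ReflTransGen.head ⟨hbp.1, hbp.2, (nbrsB_symm b c).mp hstep.2.2⟩ ih

def closedS (mi : List (List Int)) (n m : Int) (V : Set (Int × Int)) : Prop :=
  ∀ p ∈ V, ∀ q, stepR mi n m p q → q ∈ V

theorem reach_disjoint (mi : List (List Int)) (n m : Int) (V : Set (Int × Int))
    (s : Int × Int) (hV : closedS mi n m V) (hsV : s ∉ V) (hsW : inW n m s)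
    (hs0 : get2d mi s.1 s.2 ≠ 0) : ∀ p, reach mi n m s p → p ∉ V := by
  intro p h
  induction h with
  | refl => exact hsV
  | @tail b c hb hstep ih =>
    intro hcV
    have hbp := reach_props mi n m s b hsW hs0 hb
    exact ih (hV c hcV b ⟨hbp.1, hbp.2, (nbrsB_symm b c).mp hstep.2.2⟩)

theorem reach_sub_of_closed (mi : List (List Int)) (n m : Int) (V X : Set (Int × Int))
    (s : Int × Int) (hsX : s ∈ X)
    (hcl : ∀ p ∈ X, ∀ r, stepR mi n m p r → r ∈ V ∪ X)
    (hdisj : ∀ p, reach mi n m s p → p ∉ V) :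
    ∀ p, reach mi n m s p → p ∈ X := by
  intro p h
  induction h with
  | refl => exact hsX
  | @tail b c hb hstep ih =>
    rcases hcl b ih c hstep with h' | h'
    · exact absurd h' (hdisj c (Relation.ReflTransGen.tail hb hstep))
    · exact h'

-- ---- shapes, characterisations, measure ----
def shapeVis (n m : Int) (vis : List (List Int)) : Prop :=
  vis.length = n.toNat ∧ ∀ r ∈ vis, r.length = m.toNat

def rowsLike (mp mi : List (List Int)) : Prop :=
  mp.length = mi.length ∧ ∀ k : Nat, (mp.getD k []).length = (mi.getD k []).length

def visChar (n m : Int) (vis : List (List Int)) (W : Set (Int × Int)) : Prop :=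
  ∀ p : Int × Int, inW n m p → (get2d vis p.1 p.2 ≠ 0 ↔ p ∈ W)

def mpChar (mi : List (List Int)) (n m : Int) (mp : List (List Int)) (W : Set (Int × Int)) : Prop :=
  ∀ p : Int × Int, inW n m p → p ∉ W → get2d mp p.1 p.2 = get2d mi p.1 p.2

def PreF (mi : List (List Int)) (n m : Int) : Prop :=
  ∀ p : Int × Int, inW n m p → p.1.toNat < mi.length ∧ m.toNat ≤ (mi.getD p.1.toNat []).length

def unvis (n m : Int) (vis : List (List Int)) : Nat :=
  ((Finset.range n.toNat ×ˢ Finset.range m.toNat).filter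
    (fun ij => get2d vis (ij.1 : Int) (ij.2 : Int) = 0)).card

def meas5 (n m : Int) (st : List (Int × Int) × List (List Int) × List (List Int)) : Nat :=
  5 * unvis n m st.2.1 + st.1.length

theorem unvis_le (n m : Int) (vis : List (List Int)) :
    unvis n m vis ≤ n.toNat * m.toNat := by
  calc unvis n m vis ≤ (Finset.range n.toNat ×ˢ Finset.range m.toNat).card :=
        Finset.card_filter_le _ _
    _ = n.toNat * m.toNat := by simp

theorem vis_row_len (n m : Int) (vis : List (List Int)) (hsh : shapeVis n m vis)
    (k : Nat) (hk : k < n.toNat) : (vis.getD k []).length = m.toNat := by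
  have hk' : k < vis.length := by rw [hsh.1]; exact hk
  rw [List.getD_eq_getElem?_getD, List.getElem?_eq_getElem hk']
  exact hsh.2 _ (List.getElem_mem hk')

theorem shapeVis_set2d (n m : Int) (vis : List (List Int)) (i j v : Int)
    (hsh : shapeVis n m vis) : shapeVis n m (set2d vis i j v) := by
  refine ⟨by rw [length_set2d, hsh.1], ?_⟩
  intro r hr
  obtain ⟨k, hk, rfl⟩ := List.mem_iff_getElem.mp hr
  have hk' : k < (set2d vis i j v).length := hk
  have : (set2d vis i j v)[k] = (set2d vis i j v).getD k [] := by
    rw [List.getD_eq_getElem?_getD, List.getElem?_eq_getElem hk']; rfl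
  rw [this, rowlen_set2d]
  exact vis_row_len n m vis hsh k (by rw [← hsh.1, ← length_set2d vis i j v]; exact hk)

theorem rowsLike_set2d (mp mi : List (List Int)) (i j v : Int)
    (hrl : rowsLike mp mi) : rowsLike (set2d mp i j v) mi := by
  refine ⟨by rw [length_set2d, hrl.1], ?_⟩
  intro k; rw [rowlen_set2d]; exact hrl.2 k

theorem unvis_set2d_lt (n m : Int) (vis : List (List Int)) (y x : Int)
    (hsh : shapeVis n m vis) (hw : inW n m (y, x)) (h0 : get2d vis y x = 0) :
    unvis n m (set2d vis y x 1) < unvis n m vis := by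
  obtain ⟨hy0, hyn, hx0, hxm⟩ := hw
  have hyl : y.toNat < vis.length := by rw [hsh.1]; omega
  have hxl : x.toNat < (vis.getD y.toNat []).length := by
    rw [vis_row_len n m vis hsh y.toNat (by omega)]; omega
  have hsame : get2d (set2d vis y x 1) y x = 1 :=
    get2d_set2d_same vis y x 1 hy0 hx0 hyl hxl
  apply Finset.card_lt_card
  constructor
  · intro ij hij
    simp only [Finset.mem_filter, Finset.mem_product, Finset.mem_range] at hij ⊢
    refine ⟨hij.1, ?_⟩
    by_cases hc : y = (ij.1 : Int) ∧ x = (ij.2 : Int)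
    · exfalso
      rw [← hc.1, ← hc.2] at hij
      rw [hsame] at hij
      exact one_ne_zero hij.2
    · rw [get2d_set2d_ne vis y x 1 _ _ hy0 hx0 (Int.natCast_nonneg _) (Int.natCast_nonneg _) hc] at hij
      exact hij.2
  · intro hsub
    have hyx : (y.toNat, x.toNat) ∈
        (Finset.range n.toNat ×ˢ Finset.range m.toNat).filter
          (fun ij => get2d vis (ij.1 : Int) (ij.2 : Int) = 0) := by
      simp only [Finset.mem_filter, Finset.mem_product, Finset.mem_range]
      refine ⟨⟨by omega, by omega⟩, ?_⟩
      rw [Int.toNat_of_nonneg hy0, Int.toNat_of_nonneg hx0]; exact h0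
    have := hsub hyx
    simp only [Finset.mem_filter, Finset.mem_product, Finset.mem_range] at this
    rw [Int.toNat_of_nonneg hy0, Int.toNat_of_nonneg hx0, hsame] at this
    exact one_ne_zero this.2

-- ---- A side: BFS ----

def MidInv (mi : List (List Int)) (n m : Int) (s : Int × Int) (V X : Set (Int × Int))
    (p0 : Int × Int) (st : List (Int × Int) × List (List Int) × List (List Int)) : Prop :=
  shapeVis n m st.2.1 ∧ rowsLike st.2.2 mi ∧ visChar n m st.2.1 (V ∪ X) ∧
  mpChar mi n m st.2.2 (V ∪ X) ∧ (∀ p ∈ st.1, p ∈ X) ∧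
  (∀ p ∈ X, reach mi n m s p) ∧ s ∈ X ∧
  (∀ p ∈ X, p ∉ st.1 → p ≠ p0 → ∀ r, stepR mi n m p r → r ∈ V ∪ X)

set_option maxHeartbeats 1000000 in
theorem stepDir_spec (mi : List (List Int)) (n m c : Int) (s : Int × Int)
    (V X : Set (Int × Int)) (y x k : Int)
    (hk : k = 0 ∨ k = 1 ∨ k = 2 ∨ k = 3)
    (st : List (Int × Int) × List (List Int) × List (List Int))
    (hInv : MidInv mi n m s V X (y, x) st)
    (hreach : reach mi n m s (y, x)) :
    ∃ X', X ⊆ X' ∧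
      MidInv mi n m s V X' (y, x) (stepDir n m c y x st k) ∧
      meas5 n m (stepDir n m c y x st k) ≤ meas5 n m st ∧ (V ∪ X) ⊆ (V ∪ X') ∧
      (stepR mi n m (y, x) (y + PySem.List.pyGetD dyA k 0, x + PySem.List.pyGetD dxA k 0) →
        (y + PySem.List.pyGetD dyA k 0, x + PySem.List.pyGetD dxA k 0) ∈ V ∪ X') := by
  obtain ⟨q, vis, mp⟩ := st
  obtain ⟨hsh, hrl, hvc, hmc, hq, hX, hsX, hfr⟩ := hInv
  simp only at hsh hrl hvc hmc hq
  set ny := y + PySem.List.pyGetD dyA k 0 with hny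
  set nx := x + PySem.List.pyGetD dxA k 0 with hnx
  show ∃ X', X ⊆ X' ∧ MidInv mi n m s V X' (y, x)
      (if ny < 0 ∨ n ≤ ny ∨ nx < 0 ∨ m ≤ nx then (q, vis, mp)
       else if get2d vis ny nx ≠ 0 then (q, vis, mp)
       else if get2d mp ny nx = 0 then (q, vis, mp)
       else (q ++ [(ny, nx)], set2d vis ny nx 1, set2d mp ny nx c)) ∧
      meas5 n m
      (if ny < 0 ∨ n ≤ ny ∨ nx < 0 ∨ m ≤ nx then (q, vis, mp)
       else if get2d vis ny nx ≠ 0 then (q, vis, mp)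
       else if get2d mp ny nx = 0 then (q, vis, mp)
       else (q ++ [(ny, nx)], set2d vis ny nx 1, set2d mp ny nx c)) ≤ meas5 n m (q, vis, mp) ∧
      (V ∪ X) ⊆ (V ∪ X') ∧
      (stepR mi n m (y, x) (ny, nx) → (ny, nx) ∈ V ∪ X')
  split_ifs with h1 h2 h3
  · exact ⟨X, subset_rfl, ⟨hsh, hrl, hvc, hmc, hq, hX, hsX, hfr⟩, le_rfl, subset_rfl,
      fun hstep => absurd hstep.1 (by unfold inW; simp only; omega)⟩
  · exact ⟨X, subset_rfl, ⟨hsh, hrl, hvc, hmc, hq, hX, hsX, hfr⟩, le_rfl, subset_rfl,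
      fun hstep => (hvc (ny, nx) hstep.1).mp h2⟩
  · push_neg at h2
    refine ⟨X, subset_rfl, ⟨hsh, hrl, hvc, hmc, hq, hX, hsX, hfr⟩, le_rfl, subset_rfl,
      fun hstep => absurd hstep.2.1 ?_⟩
    have hnin : (ny, nx) ∉ V ∪ X := fun hin => by
      have := (hvc (ny, nx) hstep.1).mpr hin
      exact this h2
    rw [← hmc (ny, nx) hstep.1 hnin]
    simpa using h3
  · push_neg at h2
    have hw : inW n m (ny, nx) := by unfold inW; simp only; omega
    have hnin : (ny, nx) ∉ V ∪ X := fun hin => (hvc (ny, nx) hw).mpr hin h2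
    have hmi : get2d mi ny nx ≠ 0 := by
      rw [← hmc (ny, nx) hw hnin]; exact h3
    have hnbr : (ny, nx) ∈ nbrsB y x := by
      rcases hk with rfl | rfl | rfl | rfl <;>
        simp [hny, hnx, nbrsB, dyA, dxA, PySem.List.pyGetD_of_nonneg] <;> omega
    have hstep' : stepR mi n m (y, x) (ny, nx) := ⟨hw, hmi, hnbr⟩
    have hreach' : reach mi n m s (ny, nx) := Relation.ReflTransGen.tail hreach hstep'
    have hyl : ny.toNat < vis.length := by rw [hsh.1]; unfold inW at hw; omega
    have hxl : nx.toNat < (vis.getD ny.toNat []).length := by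
      rw [vis_row_len n m vis hsh ny.toNat (by unfold inW at hw; omega)]
      unfold inW at hw; omega
    refine ⟨insert (ny, nx) X, fun p hp => Set.mem_insert_of_mem _ hp, ?_, ?_, ?_, ?_⟩
    · refine ⟨shapeVis_set2d n m vis ny nx 1 hsh, rowsLike_set2d mp mi ny nx c hrl,
        ?_, ?_, ?_, ?_, Set.mem_insert_of_mem _ hsX, ?_⟩
      · intro p hp
        by_cases hpc : p = (ny, nx)
        · subst hpc
          rw [get2d_set2d_same vis ny nx 1 (by omega) (by omega) hyl hxl]
          simp
        · have hps : ¬ (ny = p.1 ∧ nx = p.2) := fun hc => hpc (Prod.ext hc.1 hc.2).symm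
          rw [get2d_set2d_ne vis ny nx 1 p.1 p.2 (by omega) (by omega) hp.1 hp.2.2.1 hps]
          rw [hvc p hp]
          simp only [Set.mem_union, Set.mem_insert_iff]
          constructor
          · rintro (h | h)
            · exact Or.inl h
            · exact Or.inr (Or.inr h)
          · rintro (h | h | h)
            · exact Or.inl h
            · exact absurd h hpc
            · exact Or.inr h
      · intro p hp hnp
        have hpc : p ≠ (ny, nx) := fun hc => hnp (by rw [hc]; exact Or.inr (Set.mem_insert _ _))
        have hps : ¬ (ny = p.1 ∧ nx = p.2) := fun hc => hpc (Prod.ext hc.1 hc.2).symm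
        rw [get2d_set2d_ne mp ny nx c p.1 p.2 (by omega) (by omega) hp.1 hp.2.2.1 hps]
        exact hmc p hp (fun hin => hnp (by
          rcases hin with h | h
          · exact Or.inl h
          · exact Or.inr (Set.mem_insert_of_mem _ h)))
      · intro p hp
        rcases List.mem_append.mp hp with h | h
        · exact Set.mem_insert_of_mem _ (hq p h)
        · simp at h; rw [h]; exact Set.mem_insert _ _
      · intro p hp
        rcases Set.mem_insert_iff.mp hp with h | h
        · rw [h]; exact hreach'
        · exact hX p h
      · intro p hp hnq hne r hr
        have hpX : p ∈ X := by
          rcases Set.mem_insert_iff.mp hp with h | h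
          · exfalso; exact hnq (by rw [h]; simp)
          · exact h
        have : r ∈ V ∪ X := hfr p hpX (fun hq' => hnq (List.mem_append.mpr (Or.inl hq'))) hne r hr
        rcases this with h | h
        · exact Or.inl h
        · exact Or.inr (Set.mem_insert_of_mem _ h)
    · have hlt := unvis_set2d_lt n m vis ny nx hsh hw h2
      simp only [meas5, List.length_append, List.length_cons, List.length_nil]
      omega
    · intro p hp
      rcases hp with h | h
      · exact Or.inl h
      · exact Or.inr (Set.mem_insert_of_mem _ h)
    · intro _; exact Or.inr (Set.mem_insert _ _)

theorem pyR4 : PySem.List.pyRange 0 4 1 = [0, 1, 2, 3] := rfl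

set_option maxHeartbeats 1000000 in
theorem bfs_final (mi : List (List Int)) (n m c : Int) (s : Int × Int)
    (V : Set (Int × Int)) (hPre : PreF mi n m)
    (hV : closedS mi n m V) (hsV : s ∉ V) (hsW : inW n m s)
    (hs0 : get2d mi s.1 s.2 ≠ 0) :
    ∀ (fuel : Nat) (q : List (Int × Int)) (vis mp : List (List Int)) (X : Set (Int × Int)),
      shapeVis n m vis → rowsLike mp mi → visChar n m vis (V ∪ X) →
      mpChar mi n m mp (V ∪ X) → (∀ p ∈ q, p ∈ X) →
      (∀ p ∈ X, reach mi n m s p) → s ∈ X →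
      (∀ p ∈ X, p ∉ q → ∀ r, stepR mi n m p r → r ∈ V ∪ X) →
      meas5 n m (q, vis, mp) < fuel →
      shapeVis n m (bfsLoop n m c fuel (q, vis, mp)).1 ∧
      rowsLike (bfsLoop n m c fuel (q, vis, mp)).2 mi ∧
      visChar n m (bfsLoop n m c fuel (q, vis, mp)).1 (V ∪ {p | reach mi n m s p}) ∧
      mpChar mi n m (bfsLoop n m c fuel (q, vis, mp)).2 (V ∪ {p | reach mi n m s p}) := by
  intro fuel
  induction fuel with
  | zero => intro q vis mp X _ _ _ _ _ _ _ _ hm; omega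
  | succ fuel ih =>
    intro q vis mp X hsh hrl hvc hmc hq hX hsX hfr hm
    match q with
    | [] =>
      show shapeVis n m (vis, mp).1 ∧ rowsLike (vis, mp).2 mi ∧ _ ∧ _
      have hdisj := reach_disjoint mi n m V s hV hsV hsW hs0
      have hXr : ∀ p, reach mi n m s p → p ∈ X :=
        reach_sub_of_closed mi n m V X s hsX
          (fun p hp r hr => hfr p hp (by simp) r hr) hdisj
      have hXeq : ∀ p : Int × Int, p ∈ V ∪ X ↔ p ∈ V ∪ {p | reach mi n m s p} := by
        intro p
        simp only [Set.mem_union, Set.mem_setOf_eq]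
        constructor
        · rintro (h | h)
          · exact Or.inl h
          · exact Or.inr (hX p h)
        · rintro (h | h)
          · exact Or.inl h
          · exact Or.inr (hXr p h)
      exact ⟨hsh, hrl, fun p hp => (hvc p hp).trans (hXeq p),
        fun p hp hnp => hmc p hp (fun hin => hnp ((hXeq p).mp hin))⟩
    | (y, x) :: q' =>
      have hInv0 : MidInv mi n m s V X (y, x) (q', vis, mp) :=
        ⟨hsh, hrl, hvc, hmc, fun p hp => hq p (List.mem_cons_of_mem _ hp), hX, hsX,
          fun p hp hnq hne r hr => hfr p hp (by
            intro hmem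
            rcases List.mem_cons.mp hmem with h | h
            · exact hne h
            · exact hnq h) r hr⟩
      have hr0 : reach mi n m s (y, x) := hX _ (hq _ List.mem_cons_self)
      obtain ⟨X1, hs1, hI1, hm1, hmo1, hc1⟩ :=
        stepDir_spec mi n m c s V X y x 0 (by omega) (q', vis, mp) hInv0 hr0
      obtain ⟨X2, hs2, hI2, hm2, hmo2, hc2⟩ :=
        stepDir_spec mi n m c s V X1 y x 1 (by omega) _ hI1 hr0
      obtain ⟨X3, hs3, hI3, hm3, hmo3, hc3⟩ :=
        stepDir_spec mi n m c s V X2 y x 2 (by omega) _ hI2 hr0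
      obtain ⟨X4, hs4, hI4, hm4, hmo4, hc4⟩ :=
        stepDir_spec mi n m c s V X3 y x 3 (by omega) _ hI3 hr0
      set st1 := stepDir n m c y x (q', vis, mp) 0
      set st2 := stepDir n m c y x st1 1
      set st3 := stepDir n m c y x st2 2
      set st4 := stepDir n m c y x st3 3
      obtain ⟨hsh4, hrl4, hvc4, hmc4, hq4, hX4, hsX4, hfr4'⟩ := hI4
      have e0 : (y + PySem.List.pyGetD dyA 0 0, x + PySem.List.pyGetD dxA 0 0) = (y, x + 1) := by
        show (y + 0, x + 1) = (y, x + 1); rw [add_zero]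
      have e1 : (y + PySem.List.pyGetD dyA 1 0, x + PySem.List.pyGetD dxA 1 0) = (y - 1, x) := by
        show (y + -1, x + 0) = (y - 1, x); rw [add_zero, ← sub_eq_add_neg]
      have e2 : (y + PySem.List.pyGetD dyA 2 0, x + PySem.List.pyGetD dxA 2 0) = (y, x - 1) := by
        show (y + 0, x + -1) = (y, x - 1); rw [add_zero, ← sub_eq_add_neg]
      have e3 : (y + PySem.List.pyGetD dyA 3 0, x + PySem.List.pyGetD dxA 3 0) = (y + 1, x) := by
        show (y + 1, x + 0) = (y + 1, x); rw [add_zero]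
      rw [e0] at hc1
      rw [e1] at hc2
      rw [e2] at hc3
      rw [e3] at hc4
      have hcov : ∀ r, stepR mi n m (y, x) r → r ∈ V ∪ X4 := by
        intro r hr
        have hmem := hr.2.2
        simp only [nbrsB, List.mem_cons] at hmem
        rcases hmem with h | h | h | h | h
        · rw [h] at hr ⊢; exact hmo4 (hmo3 (hmo2 (hc1 hr)))
        · rw [h] at hr ⊢; exact hmo4 (hmo3 (hc2 hr))
        · rw [h] at hr ⊢; exact hmo4 (hc3 hr)
        · rw [h] at hr ⊢; exact hc4 hr
        · simp at h
      have hfr4 : ∀ p ∈ X4, p ∉ st4.1 → ∀ r, stepR mi n m p r → r ∈ V ∪ X4 := by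
        intro p hp hnq r hr
        by_cases hpe : p = (y, x)
        · subst hpe; exact hcov r hr
        · exact hfr4' p hp hnq hpe r hr
      have hmeas : meas5 n m st4 < fuel := by
        have h0 : meas5 n m ((y, x) :: q', vis, mp) = meas5 n m (q', vis, mp) + 1 := by
          simp only [meas5, List.length_cons]
          omega
        omega
      have hstep : bfsLoop n m c (fuel + 1) ((y, x) :: q', vis, mp) =
          bfsLoop n m c fuel st4 := by
        show bfsLoop n m c fuel ((PySem.List.pyRange 0 4 1).foldl (stepDir n m c y x) (q', vis, mp)) = _
        rw [pyR4]
        rfl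
      rw [hstep]
      obtain ⟨q4, vis4, mp4⟩ := st4
      exact ih q4 vis4 mp4 X4 hsh4 hrl4 hvc4 hmc4 hq4 hX4 hsX4 hfr4 hmeas

theorem get2d_zeros (a b : Nat) (i j : Int) (hi : 0 ≤ i) (hj : 0 ≤ j) :
    get2d (List.replicate a (List.replicate b (0 : Int))) i j = 0 := by
  rw [get2d_nonneg _ _ _ hi hj]
  have hrow : (List.replicate a (List.replicate b (0 : Int))).getD i.toNat [] = [] ∨
      (List.replicate a (List.replicate b (0 : Int))).getD i.toNat [] = List.replicate b 0 := by
    rw [List.getD_eq_getElem?_getD, List.getElem?_replicate]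
    split_ifs with h
    · exact Or.inr rfl
    · exact Or.inl rfl
  rcases hrow with h | h <;> rw [h]
  · simp
  · rw [List.getD_eq_getElem?_getD, List.getElem?_replicate]
    split_ifs <;> rfl

-- ---- generic loop plumbing ----

def cellList (n m : Int) : List (Int × Int) :=
  (PySem.List.pyRange 0 n 1).flatMap (fun i => (PySem.List.pyRange 0 m 1).map (fun j => (i, j)))

theorem mem_cellList (n m : Int) (c : Int × Int) : c ∈ cellList n m ↔ inW n m c := by
  rcases c with ⟨i, j⟩
  unfold cellList inW
  rw [List.mem_flatMap]
  simp only [List.mem_map, PySem.List.mem_pyRange_one, Prod.mk.injEq]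
  constructor
  · rintro ⟨a, ⟨h1, h2⟩, j', ⟨h3, h4⟩, rfl, rfl⟩
    exact ⟨h1, h2, h3, h4⟩
  · rintro ⟨h1, h2, h3, h4⟩
    exact ⟨i, ⟨h1, h2⟩, j, ⟨h3, h4⟩, rfl, rfl⟩

theorem foldl_nested_eq {σ : Type} (f : σ → Int → Int → σ) (is js : List Int) (init : σ) :
    is.foldl (fun st i => js.foldl (fun st j => f st i j) st) init
      = (is.flatMap (fun i => js.map (fun j => (i, j)))).foldl
          (fun st (c : Int × Int) => f st c.1 c.2) init := by
  induction is generalizing init with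
  | nil => rfl
  | cons i is ih =>
    simp only [List.foldl_cons, List.flatMap_cons, List.foldl_append, List.foldl_map]
    rw [ih]

theorem foldl_prefix_inv {σ : Type} (step : σ → (Int × Int) → σ) (ok : (Int × Int) → Prop)
    (Inv : List (Int × Int) → σ → Prop)
    (hstep : ∀ P c s, ok c → Inv P s → Inv (P ++ [c]) (step s c)) :
    ∀ (L P : List (Int × Int)) (s : σ), (∀ c ∈ L, ok c) → Inv P s →
      Inv (P ++ L) (L.foldl step s) := by
  intro L
  induction L with
  | nil => intro P s _ h; simpa using h
  | cons c L ih =>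
    intro P s hok h
    have := ih (P ++ [c]) (step s c) (fun c' hc' => hok c' (List.mem_cons_of_mem _ hc'))
      (hstep P c s (hok c List.mem_cons_self) h)
    simpa [List.append_assoc] using this

-- ---- B side: union-find ----

def pstep (parent : PySem.Dict (Int × Int) (Int × Int)) (a : Int × Int) : Int × Int :=
  PySem.Dict.getD parent a a

def isRoot (parent : PySem.Dict (Int × Int) (Int × Int)) (a : Int × Int) : Prop :=
  pstep parent a = a

def RootsTo (parent : PySem.Dict (Int × Int) (Int × Int)) (a r : Int × Int) : Prop :=
  ∃ t : Nat, (pstep parent)^[t] a = r ∧ isRoot parent r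

theorem iter_root_fix (parent : PySem.Dict (Int × Int) (Int × Int)) (r : Int × Int)
    (h : isRoot parent r) (t : Nat) : (pstep parent)^[t] r = r := by
  induction t with
  | zero => rfl
  | succ t ih => rw [Function.iterate_succ_apply, h, ih]

theorem rootsTo_unique (parent : PySem.Dict (Int × Int) (Int × Int)) (a r s : Int × Int)
    (h1 : RootsTo parent a r) (h2 : RootsTo parent a s) : r = s := by
  obtain ⟨t1, he1, hr1⟩ := h1
  obtain ⟨t2, he2, hr2⟩ := h2
  rcases Nat.le_total t1 t2 with h | h
  · have : (pstep parent)^[t2] a = r := by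
      rw [show t2 = (t2 - t1) + t1 by omega, Function.iterate_add_apply, he1,
        iter_root_fix parent r hr1]
    rw [← this, he2]
  · have : (pstep parent)^[t1] a = s := by
      rw [show t1 = (t1 - t2) + t2 by omega, Function.iterate_add_apply, he2,
        iter_root_fix parent s hr2]
    rw [← he1, this]

theorem iter_periodic_root (parent : PySem.Dict (Int × Int) (Int × Int)) (a : Int × Int)
    (i j : Nat) (hij : i < j) (heq : (pstep parent)^[i] a = (pstep parent)^[j] a)
    (t : Nat) (hroot : isRoot parent ((pstep parent)^[t] a)) :
    isRoot parent ((pstep parent)^[i] a) := by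
  have hper : ∀ k : Nat, (pstep parent)^[i + k * (j - i)] a = (pstep parent)^[i] a := by
    intro k
    induction k with
    | zero => simp
    | succ k ih =>
      have : i + (k + 1) * (j - i) = (j - i) + (i + k * (j - i)) := by ring
      rw [this, Function.iterate_add_apply, ih, ← Function.iterate_add_apply]
      rw [show j - i + i = j by omega, ← heq]
  have hbig : (pstep parent)^[i + t * (j - i)] a = (pstep parent)^[t] a := by
    have hge : t ≤ i + t * (j - i) := by
      have : 1 ≤ j - i := by omega
      calc t ≤ t * (j - i) := Nat.le_mul_of_pos_right t (by omega)
        _ ≤ i + t * (j - i) := by omega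
    rw [show i + t * (j - i) = (i + t * (j - i) - t) + t by omega,
      Function.iterate_add_apply, iter_root_fix parent _ hroot]
  rw [hper t] at hbig
  rw [hbig]; exact hroot

theorem mem_keys_of_pstep_ne (parent : PySem.Dict (Int × Int) (Int × Int)) (a : Int × Int)
    (h : pstep parent a ≠ a) : a ∈ parent.keys := by
  by_contra hmem
  apply h
  unfold pstep
  apply PySem.Dict.getD_of_not_contains
  rw [← Bool.not_eq_true, PySem.Dict.contains_iff_mem_keys]
  exact hmem

theorem rootsTo_bound (parent : PySem.Dict (Int × Int) (Int × Int)) (a r : Int × Int)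
    (h : RootsTo parent a r) : ∃ t ≤ parent.size, (pstep parent)^[t] a = r := by
  obtain ⟨t, he, hr⟩ := h
  haveI : DecidablePred (fun k : Nat => isRoot parent ((pstep parent)^[k] a)) := by
    intro k; unfold isRoot; infer_instance
  have hex : ∃ k : Nat, isRoot parent ((pstep parent)^[k] a) := ⟨t, by rw [he]; exact hr⟩
  set t0 := Nat.find hex with ht0
  have hspec := Nat.find_spec hex
  have hmin : ∀ k < t0, ¬ isRoot parent ((pstep parent)^[k] a) := fun k hk => Nat.find_min hex hk
  have hnodup : ((List.range t0).map (fun k => (pstep parent)^[k] a)).Nodup := by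
    rw [List.nodup_map_iff_inj_on (List.nodup_range)]
    intro i hi j hj hij
    simp only [List.mem_range] at hi hj
    by_contra hne
    rcases Nat.lt_or_ge i j with h' | h'
    · exact hmin i (by omega) (iter_periodic_root parent a i j h' hij t (by rw [he]; exact hr))
    · have h'' : j < i := by omega
      exact hmin j (by omega) (iter_periodic_root parent a j i h'' hij.symm t (by rw [he]; exact hr))
  have hsub : ((List.range t0).map (fun k => (pstep parent)^[k] a)) ⊆ parent.keys := by
    intro x hx
    simp only [List.mem_map, List.mem_range] at hx
    obtain ⟨k, hk, rfl⟩ := hx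
    exact mem_keys_of_pstep_ne parent _ (hmin k hk)
  have hlen : t0 ≤ parent.keys.length := by
    have := (hnodup.subperm hsub).length_le
    simpa using this
  have hkl : parent.keys.length = parent.size := by simp [PySem.Dict.keys, PySem.Dict.size]
  refine ⟨t0, by omega, ?_⟩
  exact rootsTo_unique parent a _ r ⟨t0, rfl, hspec⟩ ⟨t, he, hr⟩

theorem ufFind_spec (parent : PySem.Dict (Int × Int) (Int × Int)) :
    ∀ (fuel t : Nat) (a r : Int × Int), t ≤ fuel → (pstep parent)^[t] a = r →
      isRoot parent r → ufFind parent fuel a = r := by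
  intro fuel
  induction fuel with
  | zero =>
    intro t a r ht he hr
    have : t = 0 := by omega
    subst this
    exact he
  | succ fuel ih =>
    intro t a r ht he hr
    show (if pstep parent a ≠ a then ufFind parent fuel (pstep parent a) else a) = r
    split_ifs with h
    · have ht0 : t ≠ 0 := by
        rintro rfl
        simp only [Function.iterate_zero, id_eq] at he
        subst he
        exact h hr
      apply ih (t - 1) (pstep parent a) r (by omega)
      · rw [← Function.iterate_succ_apply, show (t - 1).succ = t by omega]
        exact he
      · exact hr
    · push_neg at h
      exact (rootsTo_unique parent a r a ⟨t, he, hr⟩ ⟨0, rfl, h⟩).symm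

theorem ufFind_eq (parent : PySem.Dict (Int × Int) (Int × Int)) (a r : Int × Int)
    (h : RootsTo parent a r) : ufFind parent (parent.size + 1) a = r := by
  obtain ⟨t, ht, he⟩ := rootsTo_bound parent a r h
  obtain ⟨t2, _, hr2⟩ := h
  exact ufFind_spec parent (parent.size + 1) t a r (by omega) he hr2

-- UF invariant: everything is rooted, and root equality is exactly the generated equivalence
def UFInv (parent : PySem.Dict (Int × Int) (Int × Int))
    (E : (Int × Int) → (Int × Int) → Prop) : Prop :=
  (∀ a, ∃ r, RootsTo parent a r) ∧
  (∀ a b ra rb, RootsTo parent a ra → RootsTo parent b rb →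
    (ra = rb ↔ Relation.EqvGen E a b))

theorem eqvGen_mono {α : Type} {E E' : α → α → Prop} (h : ∀ a b, E a b → E' a b)
    {x y : α} (hx : Relation.EqvGen E x y) : Relation.EqvGen E' x y := by
  induction hx with
  | rel a b hab => exact Relation.EqvGen.rel a b (h a b hab)
  | refl a => exact Relation.EqvGen.refl a
  | symm a b _ ih => exact Relation.EqvGen.symm a b ih
  | trans a b c _ _ ih1 ih2 => exact Relation.EqvGen.trans a b c ih1 ih2

theorem UFInv_congr (parent : PySem.Dict (Int × Int) (Int × Int))
    (E E' : (Int × Int) → (Int × Int) → Prop) (h : UFInv parent E)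
    (hE : ∀ a b, E a b ↔ E' a b) : UFInv parent E' := by
  refine ⟨h.1, fun a b ra rb h1 h2 => ?_⟩
  rw [h.2 a b ra rb h1 h2]
  exact ⟨eqvGen_mono (fun a b => (hE a b).mp), eqvGen_mono (fun a b => (hE a b).mpr)⟩

theorem eqvGen_insert_iff {α : Type} (E : α → α → Prop) (a b x y : α) :
    Relation.EqvGen (fun u v => E u v ∨ (u = a ∧ v = b)) x y ↔
      Relation.EqvGen E x y ∨ (Relation.EqvGen E x a ∧ Relation.EqvGen E b y) ∨
        (Relation.EqvGen E x b ∧ Relation.EqvGen E a y) := by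
  constructor
  · intro h
    induction h with
    | rel u v huv =>
      rcases huv with h' | ⟨rfl, rfl⟩
      · exact Or.inl (Relation.EqvGen.rel u v h')
      · exact Or.inr (Or.inl ⟨Relation.EqvGen.refl u, Relation.EqvGen.refl v⟩)
    | refl u => exact Or.inl (Relation.EqvGen.refl u)
    | symm u v _ ih =>
      rcases ih with h' | ⟨h1, h2⟩ | ⟨h1, h2⟩
      · exact Or.inl (Relation.EqvGen.symm _ _ h')
      · exact Or.inr (Or.inr ⟨Relation.EqvGen.symm _ _ h2, Relation.EqvGen.symm _ _ h1⟩)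
      · exact Or.inr (Or.inl ⟨Relation.EqvGen.symm _ _ h2, Relation.EqvGen.symm _ _ h1⟩)
    | trans u v w _ _ ih1 ih2 =>
      rcases ih1 with h1 | ⟨h1, h1'⟩ | ⟨h1, h1'⟩ <;>
        rcases ih2 with h2 | ⟨h2, h2'⟩ | ⟨h2, h2'⟩
      · exact Or.inl (Relation.EqvGen.trans _ _ _ h1 h2)
      · exact Or.inr (Or.inl ⟨Relation.EqvGen.trans _ _ _ h1 h2, h2'⟩)
      · exact Or.inr (Or.inr ⟨Relation.EqvGen.trans _ _ _ h1 h2, h2'⟩)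
      · exact Or.inr (Or.inl ⟨h1, Relation.EqvGen.trans _ _ _ h1' h2⟩)
      · exact Or.inr (Or.inl ⟨h1, h2'⟩)
      · exact Or.inl (Relation.EqvGen.trans _ _ _ h1 h2')
      · exact Or.inr (Or.inr ⟨h1, Relation.EqvGen.trans _ _ _ h1' h2⟩)
      · exact Or.inl (Relation.EqvGen.trans _ _ _ h1 h2')
      · exact Or.inr (Or.inr ⟨h1, h2'⟩)
  · intro h
    have hab : Relation.EqvGen (fun u v => E u v ∨ (u = a ∧ v = b)) a b :=
      Relation.EqvGen.rel a b (Or.inr ⟨rfl, rfl⟩)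
    have hmono : ∀ {u v : α}, Relation.EqvGen E u v →
        Relation.EqvGen (fun u v => E u v ∨ (u = a ∧ v = b)) u v :=
      fun h' => eqvGen_mono (fun _ _ h'' => Or.inl h'') h'
    rcases h with h' | ⟨h1, h2⟩ | ⟨h1, h2⟩
    · exact hmono h'
    · exact Relation.EqvGen.trans _ _ _ (hmono h1) (Relation.EqvGen.trans _ _ _ hab (hmono h2))
    · exact Relation.EqvGen.trans _ _ _ (hmono h1)
        (Relation.EqvGen.trans _ _ _ (Relation.EqvGen.symm _ _ hab) (hmono h2))

theorem eqvGen_false {α : Type} (x y : α) :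
    Relation.EqvGen (fun _ _ => False) x y ↔ x = y := by
  constructor
  · intro h
    induction h with
    | rel _ _ h => exact absurd h id
    | refl => rfl
    | symm _ _ _ ih => exact ih.symm
    | trans _ _ _ _ _ ih1 ih2 => exact ih1.trans ih2
  · rintro rfl; exact Relation.EqvGen.refl x

theorem UFInv_empty : UFInv PySem.Dict.empty (fun _ _ => False) := by
  have hid : ∀ a : Int × Int, pstep PySem.Dict.empty a = a := by
    intro a; unfold pstep; simp [pysem]
  have hroot : ∀ a : Int × Int, isRoot PySem.Dict.empty a := hid
  have hrt : ∀ a r : Int × Int, RootsTo PySem.Dict.empty a r → r = a := by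
    intro a r ⟨t, he, _⟩
    rw [← he, iter_root_fix _ a (hroot a) t]
  refine ⟨fun a => ⟨a, 0, rfl, hroot a⟩, fun a b ra rb h1 h2 => ?_⟩
  rw [hrt a ra h1, hrt b rb h2, eqvGen_false]

theorem pstep_insert (parent : PySem.Dict (Int × Int) (Int × Int)) (ra rb x : Int × Int) :
    pstep (parent.insert ra rb) x = if x = ra then rb else pstep parent x := by
  unfold pstep
  rw [PySem.Dict.getD_insert parent ra x rb x]

theorem rootsTo_insert (parent : PySem.Dict (Int × Int) (Int × Int)) (ra rb : Int × Int)
    (hra : isRoot parent ra) (hrb : isRoot parent rb) (hne : ra ≠ rb)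
    (x r : Int × Int) (h : RootsTo parent x r) :
    RootsTo (parent.insert ra rb) x (if r = ra then rb else r) := by
  haveI : DecidablePred (fun k : Nat => isRoot parent ((pstep parent)^[k] x)) := by
    intro k; unfold isRoot; infer_instance
  obtain ⟨t, he, hr⟩ := h
  have hex : ∃ k : Nat, isRoot parent ((pstep parent)^[k] x) := ⟨t, by rw [he]; exact hr⟩
  set t0 := Nat.find hex with ht0
  have hspec := Nat.find_spec hex
  have hmin : ∀ k < t0, ¬ isRoot parent ((pstep parent)^[k] x) := fun k hk => Nat.find_min hex hk
  have hr0 : (pstep parent)^[t0] x = r :=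
    rootsTo_unique parent x _ r ⟨t0, rfl, hspec⟩ ⟨t, he, hr⟩
  have hrbroot : isRoot (parent.insert ra rb) rb := by
    unfold isRoot
    rw [pstep_insert, if_neg (Ne.symm hne)]
    exact hrb
  have hiter : ∀ k ≤ t0, (pstep (parent.insert ra rb))^[k] x = (pstep parent)^[k] x := by
    intro k hk
    induction k with
    | zero => rfl
    | succ k ih =>
      rw [Function.iterate_succ_apply', Function.iterate_succ_apply', ih (by omega)]
      rw [pstep_insert]
      rw [if_neg]
      intro hc
      exact hmin k (by omega) (by rw [hc]; exact hra)
  split_ifs with hcase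
  · subst hcase
    refine ⟨t0 + 1, ?_, hrbroot⟩
    rw [Function.iterate_succ_apply', hiter t0 le_rfl, hr0, pstep_insert, if_pos rfl]
  · refine ⟨t0, ?_, ?_⟩
    · rw [hiter t0 le_rfl, hr0]
    · unfold isRoot
      rw [pstep_insert, if_neg hcase]
      exact hr

theorem ufUnion_inv (parent : PySem.Dict (Int × Int) (Int × Int))
    (E : (Int × Int) → (Int × Int) → Prop) (a b : Int × Int) (h : UFInv parent E) :
    UFInv (ufUnion parent a b) (fun u v => E u v ∨ (u = a ∧ v = b)) := by
  obtain ⟨hall, hiff⟩ := h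
  obtain ⟨ra, hra⟩ := hall a
  obtain ⟨rb, hrb⟩ := hall b
  have hfa : ufFind parent (parent.size + 1) a = ra := ufFind_eq parent a ra hra
  have hfb : ufFind parent (parent.size + 1) b = rb := ufFind_eq parent b rb hrb
  show UFInv (if ufFind parent (parent.size + 1) a ≠ ufFind parent (parent.size + 1) b
      then parent.insert _ _ else parent) _
  rw [hfa, hfb]
  split_ifs with hcase
  · -- ra ≠ rb : link ra beneath rb
    have hraroot : isRoot parent ra := hra.choose_spec.2
    have hrbroot : isRoot parent rb := hrb.choose_spec.2
    have hrt := rootsTo_insert parent ra rb hraroot hrbroot hcase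
    constructor
    · intro x
      obtain ⟨r, hr⟩ := hall x
      exact ⟨_, hrt x r hr⟩
    · intro x y rx' ry' hx' hy'
      obtain ⟨rx, hx⟩ := hall x
      obtain ⟨ry, hy⟩ := hall y
      have hx'' := hrt x rx hx
      have hy'' := hrt y ry hy
      have hex : rx' = (if rx = ra then rb else rx) :=
        rootsTo_unique _ x _ _ hx' hx''
      have hey : ry' = (if ry = ra then rb else ry) :=
        rootsTo_unique _ y _ _ hy' hy''
      rw [hex, hey, eqvGen_insert_iff]
      rw [← hiff x y rx ry hx hy, ← hiff x a rx ra hx hra, ← hiff x b rx rb hx hrb]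
      have hba : Relation.EqvGen E b y ↔ ry = rb := by
        rw [← hiff b y rb ry hrb hy]; exact ⟨Eq.symm, Eq.symm⟩
      have hay : Relation.EqvGen E a y ↔ ry = ra := by
        rw [← hiff a y ra ry hra hy]; exact ⟨Eq.symm, Eq.symm⟩
      rw [hba, hay]
      split_ifs with h1 h2 h2 <;> constructor <;> intro hh <;> subst_vars <;> tauto
  · -- ra = rb : nothing to do, and the new edge is already implied
    push_neg at hcase
    have hEab : Relation.EqvGen E a b := (hiff a b ra rb hra hrb).mp hcase
    refine ⟨hall, fun x y rx ry hx hy => ?_⟩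
    rw [hiff x y rx ry hx hy, eqvGen_insert_iff]
    constructor
    · exact Or.inl
    · rintro (h' | ⟨h1, h2⟩ | ⟨h1, h2⟩)
      · exact h'
      · exact Relation.EqvGen.trans _ _ _ h1 (Relation.EqvGen.trans _ _ _ hEab h2)
      · exact Relation.EqvGen.trans _ _ _ h1
          (Relation.EqvGen.trans _ _ _ (Relation.EqvGen.symm _ _ hEab) h2)

-- edges B unions: right/down neighbours among nonzero in-window cells
def Eedge (mi : List (List Int)) (n m : Int) (u v : Int × Int) : Prop :=
  inW n m u ∧ get2d mi u.1 u.2 ≠ 0 ∧ inW n m v ∧ get2d mi v.1 v.2 ≠ 0 ∧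
    (v = (u.1, u.2 + 1) ∨ v = (u.1 + 1, u.2))

def Eproc (mi : List (List Int)) (n m : Int) (P : List (Int × Int)) (u v : Int × Int) : Prop :=
  u ∈ P ∧ Eedge mi n m u v

theorem unionStepB_inv (mi : List (List Int)) (n m i j : Int) (P : List (Int × Int))
    (parent : PySem.Dict (Int × Int) (Int × Int)) (hw : inW n m (i, j))
    (h : UFInv parent (Eproc mi n m P)) :
    UFInv (unionStepB mi n m i parent j) (Eproc mi n m (P ++ [(i, j)])) := by
  obtain ⟨h1, h2, h3, h4⟩ := hw
  simp only at h1 h2 h3 h4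
  have hsplit : ∀ u v, Eproc mi n m (P ++ [(i, j)]) u v ↔
      Eproc mi n m P u v ∨ (u = (i, j) ∧ Eedge mi n m (i, j) v) := by
    intro u v
    unfold Eproc
    rw [List.mem_append, List.mem_singleton]
    constructor
    · rintro ⟨hm | hm, he⟩
      · exact Or.inl ⟨hm, he⟩
      · subst hm; exact Or.inr ⟨rfl, he⟩
    · rintro (⟨hm, he⟩ | ⟨rfl, he⟩)
      · exact ⟨Or.inl hm, he⟩
      · exact ⟨Or.inr rfl, he⟩
  rw [show unionStepB mi n m i parent j =
      (if get2d mi i j ≠ 0 then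
        (if i + 1 < n ∧ get2d mi (i + 1) j ≠ 0
          then ufUnion (if j + 1 < m ∧ get2d mi i (j + 1) ≠ 0
              then ufUnion parent (i, j) (i, j + 1) else parent) (i, j) (i + 1, j)
          else (if j + 1 < m ∧ get2d mi i (j + 1) ≠ 0
              then ufUnion parent (i, j) (i, j + 1) else parent))
      else parent) from rfl]
  by_cases h0 : get2d mi i j ≠ 0
  · rw [if_pos h0]
    have hEc : ∀ v, Eedge mi n m (i, j) v ↔
        ((j + 1 < m ∧ get2d mi i (j + 1) ≠ 0) ∧ v = (i, j + 1)) ∨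
        ((i + 1 < n ∧ get2d mi (i + 1) j ≠ 0) ∧ v = (i + 1, j)) := by
      intro v
      unfold Eedge
      constructor
      · rintro ⟨_, _, hv, hnz, hvr | hvd⟩
        · subst hvr
          obtain ⟨g1, g2, g3, g4⟩ := hv
          simp only at g1 g2 g3 g4
          exact Or.inl ⟨⟨g4, hnz⟩, rfl⟩
        · subst hvd
          obtain ⟨g1, g2, g3, g4⟩ := hv
          simp only at g1 g2 g3 g4
          exact Or.inr ⟨⟨g2, hnz⟩, rfl⟩
      · rintro (⟨⟨hc1, hc2⟩, rfl⟩ | ⟨⟨hc1, hc2⟩, rfl⟩)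
        · exact ⟨⟨h1, h2, h3, h4⟩, h0, ⟨h1, h2, by omega, hc1⟩, hc2, Or.inl rfl⟩
        · exact ⟨⟨h1, h2, h3, h4⟩, h0, ⟨by omega, hc1, h3, h4⟩, hc2, Or.inr rfl⟩
    have step1 : UFInv (if j + 1 < m ∧ get2d mi i (j + 1) ≠ 0
          then ufUnion parent (i, j) (i, j + 1) else parent)
        (fun u v => Eproc mi n m P u v ∨
          ((j + 1 < m ∧ get2d mi i (j + 1) ≠ 0) ∧ u = (i, j) ∧ v = (i, j + 1))) := by
      by_cases hc : j + 1 < m ∧ get2d mi i (j + 1) ≠ 0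
      · rw [if_pos hc]
        exact UFInv_congr _ _ _ (ufUnion_inv parent _ (i, j) (i, j + 1) h)
          (fun u v => by tauto)
      · rw [if_neg hc]
        exact UFInv_congr _ _ _ h (fun u v => by tauto)
    have step2 : UFInv (if i + 1 < n ∧ get2d mi (i + 1) j ≠ 0
          then ufUnion (if j + 1 < m ∧ get2d mi i (j + 1) ≠ 0
              then ufUnion parent (i, j) (i, j + 1) else parent) (i, j) (i + 1, j)
          else (if j + 1 < m ∧ get2d mi i (j + 1) ≠ 0
              then ufUnion parent (i, j) (i, j + 1) else parent))
        (fun u v => (Eproc mi n m P u v ∨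
          ((j + 1 < m ∧ get2d mi i (j + 1) ≠ 0) ∧ u = (i, j) ∧ v = (i, j + 1))) ∨
          ((i + 1 < n ∧ get2d mi (i + 1) j ≠ 0) ∧ u = (i, j) ∧ v = (i + 1, j))) := by
      by_cases hc : i + 1 < n ∧ get2d mi (i + 1) j ≠ 0
      · rw [if_pos hc]
        exact UFInv_congr _ _ _ (ufUnion_inv _ _ (i, j) (i + 1, j) step1)
          (fun u v => by tauto)
      · rw [if_neg hc]
        exact UFInv_congr _ _ _ step1 (fun u v => by tauto)
    refine UFInv_congr _ _ _ step2 (fun u v => ?_)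
    rw [hsplit]
    constructor
    · rintro ((h' | ⟨hc, rfl, rfl⟩) | ⟨hc, rfl, rfl⟩)
      · exact Or.inl h'
      · exact Or.inr ⟨rfl, (hEc _).mpr (Or.inl ⟨hc, rfl⟩)⟩
      · exact Or.inr ⟨rfl, (hEc _).mpr (Or.inr ⟨hc, rfl⟩)⟩
    · rintro (h' | ⟨rfl, hE⟩)
      · exact Or.inl (Or.inl h')
      · rcases (hEc _).mp hE with ⟨hc, rfl⟩ | ⟨hc, rfl⟩
        · exact Or.inl (Or.inr ⟨hc, rfl, rfl⟩)
        · exact Or.inr ⟨hc, rfl, rfl⟩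
  · rw [if_neg h0]
    refine UFInv_congr _ _ _ h (fun u v => ?_)
    rw [hsplit]
    constructor
    · exact Or.inl
    · rintro (h' | ⟨rfl, hE⟩)
      · exact h'
      · exact absurd hE.2.1 (by simpa using h0)

-- ---- Eedge-equivalence = reach ----

theorem eqvGen_to_reach (mi : List (List Int)) (n m : Int) (x y : Int × Int)
    (h : Relation.EqvGen (Eedge mi n m) x y) :
    x = y ∨ (inW n m x ∧ get2d mi x.1 x.2 ≠ 0 ∧ inW n m y ∧ get2d mi y.1 y.2 ≠ 0 ∧
      reach mi n m x y) := by
  induction h with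
  | rel u v huv =>
    obtain ⟨h1, h2, h3, h4, h5⟩ := huv
    refine Or.inr ⟨h1, h2, h3, h4, Relation.ReflTransGen.single ⟨h3, h4, ?_⟩⟩
    rcases h5 with rfl | rfl <;> simp [nbrsB]
  | refl u => exact Or.inl rfl
  | symm u v _ ih =>
    rcases ih with rfl | ⟨h1, h2, h3, h4, h5⟩
    · exact Or.inl rfl
    · exact Or.inr ⟨h3, h4, h1, h2, reach_symm mi n m u v h1 h2 h5⟩
  | trans u v w _ _ ih1 ih2 =>
    rcases ih1 with rfl | ⟨h1, h2, h3, h4, h5⟩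
    · exact ih2
    · rcases ih2 with rfl | ⟨g1, g2, g3, g4, g5⟩
      · exact Or.inr ⟨h1, h2, h3, h4, h5⟩
      · exact Or.inr ⟨h1, h2, g3, g4, Relation.ReflTransGen.trans h5 g5⟩

theorem reach_to_eqvGen (mi : List (List Int)) (n m : Int) (s p : Int × Int)
    (hsW : inW n m s) (hs0 : get2d mi s.1 s.2 ≠ 0) (h : reach mi n m s p) :
    Relation.EqvGen (Eedge mi n m) s p := by
  induction h with
  | refl => exact Relation.EqvGen.refl s
  | @tail b c hb hstep ih =>
    have hbp := reach_props mi n m s b hsW hs0 hb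
    obtain ⟨hcW, hc0, hnbr⟩ := hstep
    rcases b with ⟨by_, bx⟩
    rcases c with ⟨cy, cx⟩
    simp only [nbrsB, List.mem_cons] at hnbr
    have hedge : Relation.EqvGen (Eedge mi n m) (by_, bx) (cy, cx) := by
      rcases hnbr with h' | h' | h' | h' | h'
      · exact Relation.EqvGen.rel _ _ ⟨hbp.1, hbp.2, hcW, hc0, Or.inl (by rw [h'])⟩
      · refine Relation.EqvGen.symm _ _ (Relation.EqvGen.rel _ _
          ⟨hcW, hc0, hbp.1, hbp.2, Or.inr ?_⟩)
        rw [h']; simp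
      · refine Relation.EqvGen.symm _ _ (Relation.EqvGen.rel _ _
          ⟨hcW, hc0, hbp.1, hbp.2, Or.inl ?_⟩)
        rw [h']; simp
      · exact Relation.EqvGen.rel _ _ ⟨hbp.1, hbp.2, hcW, hc0, Or.inr (by rw [h'])⟩
      · simp at h'
    exact Relation.EqvGen.trans _ _ _ ih hedge

-- ---- A side: simulation against the root function ----

def SimA (mi : List (List Int)) (n m : Int) (ρ : Int × Int → Int × Int)
    (P : List (Int × Int)) (st : Int × List (List Int) × List (List Int)) : Prop :=
  ∃ V : Set (Int × Int),
    shapeVis n m st.2.1 ∧ rowsLike st.2.2 mi ∧ visChar n m st.2.1 V ∧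
    mpChar mi n m st.2.2 V ∧ closedS mi n m V ∧ (∀ p ∈ V, inW n m p) ∧
    (∀ p, p ∈ V ↔ ∃ s ∈ P, get2d mi s.1 s.2 = 1 ∧ reach mi n m s p) ∧
    (∀ s ∈ P, inW n m s) ∧
    st.1 = (((P.filter (fun c => decide (get2d mi c.1 c.2 = 1))).map ρ).toFinset.card : Int)

set_option maxHeartbeats 1000000 in
theorem cell_simA (mi : List (List Int)) (n m : Int) (ρ : Int × Int → Int × Int)
    (hPre : PreF mi n m)
    (hρ : ∀ s t, inW n m s → inW n m t → get2d mi s.1 s.2 = 1 → get2d mi t.1 t.2 = 1 →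
      (ρ s = ρ t ↔ reach mi n m s t))
    (i j : Int) (hij : inW n m (i, j)) (P : List (Int × Int))
    (st : Int × List (List Int) × List (List Int)) (h : SimA mi n m ρ P st) :
    SimA mi n m ρ (P ++ [(i, j)]) (cellStepA n m i st j) := by
  obtain ⟨V, hsh, hrl, hvc, hmc, hclo, hVw, hchar, hPw, hcnt⟩ := h
  obtain ⟨cA, visA, mpA⟩ := st
  simp only at hsh hrl hvc hmc hcnt
  have hw1 : (0 : Int) ≤ i := hij.1
  have hw2 : i < n := hij.2.1
  have hw3 : (0 : Int) ≤ j := hij.2.2.1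
  have hw4 : j < m := hij.2.2.2
  have hfilt1 : get2d mi i j = 1 →
      List.filter (fun c : Int × Int => decide (get2d mi c.1 c.2 = 1)) [(i, j)] = [(i, j)] := by
    intro h1
    simp [List.filter, h1]
  have hfilt0 : ¬ get2d mi i j = 1 →
      List.filter (fun c : Int × Int => decide (get2d mi c.1 c.2 = 1)) [(i, j)] = [] := by
    intro h1
    simp [List.filter, h1]
  by_cases hseed : get2d mi i j = 1 ∧ (i, j) ∉ V
  · have hnV : (i, j) ∉ V := hseed.2
    have hAcond : get2d mpA i j = 1 ∧ get2d visA i j = 0 := by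
      refine ⟨by rw [hmc (i, j) hij hnV]; exact hseed.1, ?_⟩
      by_contra hnz
      exact hnV ((hvc (i, j) hij).mp hnz)
    show SimA mi n m ρ (P ++ [(i, j)]) (cellStepA n m i (cA, visA, mpA) j)
    rw [cellStepA, if_pos hAcond]
    simp only
    have hs0 : get2d mi (i, j).1 (i, j).2 ≠ 0 := by
      show get2d mi i j ≠ 0
      rw [hseed.1]; exact one_ne_zero
    have hyl : i.toNat < visA.length := by rw [hsh.1]; omega
    have hxl : j.toNat < (visA.getD i.toNat []).length := by
      rw [vis_row_len n m visA hsh i.toNat (by omega)]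
      omega
    have hsh1 : shapeVis n m (set2d visA i j 1) := shapeVis_set2d n m visA i j 1 hsh
    have hrl1 : rowsLike (set2d mpA i j (cA + 1)) mi := rowsLike_set2d mpA mi i j _ hrl
    have hvc1 : visChar n m (set2d visA i j 1) (V ∪ {(i, j)}) := by
      intro p hp
      by_cases hpc : p = (i, j)
      · subst hpc
        rw [get2d_set2d_same visA i j 1 hw1 hw3 hyl hxl]
        simp
      · have hps : ¬ (i = p.1 ∧ j = p.2) := fun hc => hpc (Prod.ext hc.1 hc.2).symm
        rw [get2d_set2d_ne visA i j 1 p.1 p.2 hw1 hw3 hp.1 hp.2.2.1 hps, hvc p hp]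
        constructor
        · exact fun h' => Or.inl h'
        · rintro (h' | h')
          · exact h'
          · exact absurd h' hpc
    have hmc1 : mpChar mi n m (set2d mpA i j (cA + 1)) (V ∪ {(i, j)}) := by
      intro p hp hnp
      have hpc : p ≠ (i, j) := fun hc => hnp (Or.inr hc)
      have hps : ¬ (i = p.1 ∧ j = p.2) := fun hc => hpc (Prod.ext hc.1 hc.2).symm
      rw [get2d_set2d_ne mpA i j (cA + 1) p.1 p.2 hw1 hw3 hp.1 hp.2.2.1 hps]
      exact hmc p hp (fun h' => hnp (Or.inl h'))
    have hmeas : meas5 n m ([(i, j)], set2d visA i j 1, set2d mpA i j (cA + 1)) <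
        5 * (n.toNat * m.toNat) + 5 := by
      have := unvis_le n m (set2d visA i j 1)
      simp only [meas5, List.length_cons, List.length_nil]
      omega
    have hbfs := bfs_final mi n m (cA + 1) (i, j) V hPre hclo hnV hij hs0
      (5 * (n.toNat * m.toNat) + 5) [(i, j)] (set2d visA i j 1) (set2d mpA i j (cA + 1))
      {(i, j)}
      hsh1 hrl1 hvc1 hmc1
      (by intro p hp; rw [List.mem_singleton.mp hp]; exact rfl)
      (by intro p hp; cases Set.eq_of_mem_singleton hp; exact Relation.ReflTransGen.refl)
      rfl
      (by intro p hp hnq; exact absurd (by cases Set.eq_of_mem_singleton hp; simp) hnq)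
      hmeas
    obtain ⟨hsh2, hrl2, hvc2, hmc2⟩ := hbfs
    refine ⟨V ∪ {p | reach mi n m (i, j) p}, hsh2, hrl2, hvc2, hmc2, ?_, ?_, ?_, ?_, ?_⟩
    · intro p hp r hr
      rcases hp with h2 | h2
      · exact Or.inl (hclo p h2 r hr)
      · exact Or.inr (Relation.ReflTransGen.tail h2 hr)
    · intro p hp
      rcases hp with h2 | h2
      · exact hVw p h2
      · exact (reach_props mi n m (i, j) p hij hs0 h2).1
    · intro p
      constructor
      · rintro (h2 | h2)
        · obtain ⟨s2, hs2, hb1, hb2⟩ := (hchar p).mp h2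
          exact ⟨s2, List.mem_append.mpr (Or.inl hs2), hb1, hb2⟩
        · exact ⟨(i, j), List.mem_append.mpr (Or.inr (by simp)), hseed.1, h2⟩
      · rintro ⟨s2, hs2, hb1, hb2⟩
        rcases List.mem_append.mp hs2 with h2 | h2
        · exact Or.inl ((hchar p).mpr ⟨s2, h2, hb1, hb2⟩)
        · rw [List.mem_singleton.mp h2] at hb1 hb2
          exact Or.inr hb2
    · intro s2 hs2
      rcases List.mem_append.mp hs2 with h2 | h2
      · exact hPw s2 h2
      · rw [List.mem_singleton.mp h2]; exact hij
    · have hfresh : ρ (i, j) ∉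
          ((P.filter (fun c => decide (get2d mi c.1 c.2 = 1))).map ρ).toFinset := by
        rw [List.mem_toFinset, List.mem_map]
        rintro ⟨s2, hs2, heq⟩
        rw [List.mem_filter] at hs2
        have hb1 : get2d mi s2.1 s2.2 = 1 := by simpa using hs2.2
        have hW2 : inW n m s2 := hPw s2 hs2.1
        have hre := (hρ s2 (i, j) hW2 hij hb1 hseed.1).mp heq
        exact hnV ((hchar (i, j)).mpr ⟨s2, hs2.1, hb1, hre⟩)
      have hset : (((P ++ [(i, j)]).filter
            (fun c => decide (get2d mi c.1 c.2 = 1))).map ρ).toFinset =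
          insert (ρ (i, j))
            ((P.filter (fun c => decide (get2d mi c.1 c.2 = 1))).map ρ).toFinset := by
        rw [List.filter_append, hfilt1 hseed.1, List.map_append, List.toFinset_append]
        ext z
        simp only [Finset.mem_union, Finset.mem_insert, List.mem_toFinset, List.map_cons,
          List.map_nil, List.mem_cons, List.not_mem_nil, or_false]
        tauto
      rw [hset, Finset.card_insert_of_notMem hfresh, hcnt]
      push_cast
      ring
  · have hAcond : ¬ (get2d mpA i j = 1 ∧ get2d visA i j = 0) := by
      rintro ⟨h1, h2⟩
      have hnV : (i, j) ∉ V := fun hv => ((hvc (i, j) hij).mpr hv) h2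
      exact hseed ⟨by rw [← hmc (i, j) hij hnV]; exact h1, hnV⟩
    show SimA mi n m ρ (P ++ [(i, j)]) (cellStepA n m i (cA, visA, mpA) j)
    rw [cellStepA, if_neg hAcond]
    have hchar2 : ∀ p, p ∈ V ↔ ∃ s2 ∈ P ++ [(i, j)], get2d mi s2.1 s2.2 = 1 ∧
        reach mi n m s2 p := by
      intro p
      constructor
      · rintro h2
        obtain ⟨s2, hs2, hb1, hb2⟩ := (hchar p).mp h2
        exact ⟨s2, List.mem_append.mpr (Or.inl hs2), hb1, hb2⟩
      · rintro ⟨s2, hs2, hb1, hb2⟩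
        rcases List.mem_append.mp hs2 with h2 | h2
        · exact (hchar p).mpr ⟨s2, h2, hb1, hb2⟩
        · rw [List.mem_singleton.mp h2] at hb1 hb2
          have hiV : (i, j) ∈ V := by
            by_contra hiV
            exact hseed ⟨hb1, hiV⟩
          obtain ⟨s0, hs0P, hs01, hs0r⟩ := (hchar (i, j)).mp hiV
          exact (hchar p).mpr ⟨s0, hs0P, hs01, Relation.ReflTransGen.trans hs0r hb2⟩
    refine ⟨V, hsh, hrl, hvc, hmc, hclo, hVw, hchar2, ?_, ?_⟩
    · intro s2 hs2
      rcases List.mem_append.mp hs2 with h2 | h2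
      · exact hPw s2 h2
      · rw [List.mem_singleton.mp h2]; exact hij
    · by_cases h1 : get2d mi i j = 1
      · have hiV : (i, j) ∈ V := by
          by_contra hiV
          exact hseed ⟨h1, hiV⟩
        obtain ⟨s0, hs0P, hs01, hs0r⟩ := (hchar (i, j)).mp hiV
        have hmem : ρ (i, j) ∈
            ((P.filter (fun c => decide (get2d mi c.1 c.2 = 1))).map ρ).toFinset := by
          rw [List.mem_toFinset, List.mem_map]
          refine ⟨s0, ?_, ?_⟩
          · rw [List.mem_filter]; exact ⟨hs0P, by simpa using hs01⟩
          · exact (hρ s0 (i, j) (hPw s0 hs0P) hij hs01 h1).mpr hs0r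
        have hset : (((P ++ [(i, j)]).filter
              (fun c => decide (get2d mi c.1 c.2 = 1))).map ρ).toFinset =
            ((P.filter (fun c => decide (get2d mi c.1 c.2 = 1))).map ρ).toFinset := by
          rw [List.filter_append, hfilt1 h1, List.map_append, List.toFinset_append]
          ext z
          simp only [Finset.mem_union, List.mem_toFinset, List.map_cons, List.map_nil,
            List.mem_cons, List.not_mem_nil, or_false]
          constructor
          · rintro (hz | hz)
            · exact hz
            · rw [hz]; exact List.mem_toFinset.mp hmem
          · exact Or.inl
        rw [hset]
        exact hcnt
      · have hset : (((P ++ [(i, j)]).filter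
              (fun c => decide (get2d mi c.1 c.2 = 1))).map ρ).toFinset =
            ((P.filter (fun c => decide (get2d mi c.1 c.2 = 1))).map ρ).toFinset := by
          rw [List.filter_append, hfilt0 h1, List.map_append]
          simp
        rw [hset]
        exact hcnt

-- ---- B's counting pass ----

theorem setfold_card (mi : List (List Int)) (ρ : Int × Int → Int × Int) :
    ∀ (L : List (Int × Int)) (s : PySem.Set (Int × Int)), s.Nodup →
      (L.foldl (fun s c => if get2d mi c.1 c.2 = 1 then PySem.Set.add s (ρ c) else s) s).Nodup ∧
      (L.foldl (fun s c => if get2d mi c.1 c.2 = 1 then PySem.Set.add s (ρ c) else s) s).toFinset =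
        s.toFinset ∪ ((L.filter (fun c => decide (get2d mi c.1 c.2 = 1))).map ρ).toFinset := by
  intro L
  induction L with
  | nil => intro s hnd; simpa using hnd
  | cons c L ih =>
    intro s hnd
    by_cases hc : get2d mi c.1 c.2 = 1
    · have hnd2 : (PySem.Set.add s (ρ c)).Nodup := PySem.Set.nodup_add s (ρ c) hnd
      obtain ⟨g1, g2⟩ := ih (PySem.Set.add s (ρ c)) hnd2
      rw [List.foldl_cons, if_pos hc]
      refine ⟨g1, ?_⟩
      rw [g2, List.filter_cons_of_pos (by simpa using hc)]
      have hadd : (PySem.Set.add s (ρ c)).toFinset = insert (ρ c) s.toFinset := by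
        ext z
        rw [List.mem_toFinset, PySem.Set.mem_add, Finset.mem_insert, List.mem_toFinset]
        tauto
      rw [hadd]
      ext z
      simp only [List.map_cons, List.toFinset_cons, Finset.mem_union, Finset.mem_insert,
        List.mem_toFinset]
      tauto
    · rw [List.foldl_cons, if_neg hc, List.filter_cons_of_neg (by simpa using hc)]
      exact ih s hnd

-- ===== VERDICT (by name: the statement is the Claim_ definition above) =====
theorem get_island_cnt_spec : Claim_equal_get_island_cnt := by
  unfold Claim_equal_get_island_cnt
  intro mi n m _ hpre
  unfold Spec_get_island_cnt
  have hPre : PreF mi n m := by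
    intro p hp
    obtain ⟨h1, h2, h3, h4⟩ := hp
    have hn : 0 < n := by omega
    have hm : 0 < m := by omega
    obtain ⟨hlen, hrow⟩ := hpre hn hm
    have hplen : p.1.toNat < mi.length := by omega
    refine ⟨hplen, ?_⟩
    have hmem : mi.getD p.1.toNat [] ∈ mi.take n.toNat := by
      rw [List.getD_eq_getElem?_getD, List.getElem?_eq_getElem hplen]
      have hlt : p.1.toNat < (mi.take n.toNat).length := by
        rw [List.length_take]; omega
      have : (mi.take n.toNat)[p.1.toNat] = mi[p.1.toNat] := List.getElem_take
      rw [← this]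
      exact List.getElem_mem hlt
    have := hrow _ hmem
    omega
  have hcells : ∀ c ∈ cellList n m, inW n m c := fun c hc => (mem_cellList n m c).mp hc
  have hA : get_island_cnt mi n m =
      ((cellList n m).foldl (fun st c => cellStepA n m c.1 st c.2)
        (0, List.replicate n.toNat (List.replicate m.toNat (0 : Int)), mi)).1 := by
    unfold get_island_cnt cellList
    show ((PySem.List.pyRange 0 n 1).foldl
        (fun st i => (PySem.List.pyRange 0 m 1).foldl (fun st j => cellStepA n m i st j) st)
        (0, List.replicate n.toNat (List.replicate m.toNat (0 : Int)), mi)).1 = _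
    rw [foldl_nested_eq (fun st i j => cellStepA n m i st j)]
  set parentF := (PySem.List.pyRange 0 n 1).foldl
      (fun par i => (PySem.List.pyRange 0 m 1).foldl (unionStepB mi n m i) par)
      PySem.Dict.empty with hparent
  have hBp : parentF = (cellList n m).foldl (fun par c => unionStepB mi n m c.1 par c.2)
      PySem.Dict.empty := by
    rw [hparent]
    unfold cellList
    show (PySem.List.pyRange 0 n 1).foldl
        (fun par i => (PySem.List.pyRange 0 m 1).foldl (fun par j => unionStepB mi n m i par j) par)
        PySem.Dict.empty = _
    rw [foldl_nested_eq (fun par i j => unionStepB mi n m i par j)]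
  have hUF : UFInv parentF (Eproc mi n m (cellList n m)) := by
    rw [hBp]
    have hbase : UFInv PySem.Dict.empty (Eproc mi n m ([] : List (Int × Int))) := by
      refine UFInv_congr _ _ _ UFInv_empty (fun u v => ?_)
      constructor
      · exact False.elim
      · intro hv
        exact absurd hv.1 (List.not_mem_nil)
    exact foldl_prefix_inv (fun par c => unionStepB mi n m c.1 par c.2) (inW n m)
      (fun P par => UFInv par (Eproc mi n m P))
      (fun P c par hok hinv => unionStepB_inv mi n m c.1 c.2 P par hok hinv)
      (cellList n m) [] PySem.Dict.empty hcells hbase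
  have hUF2 : UFInv parentF (Eedge mi n m) := by
    refine UFInv_congr _ _ _ hUF (fun u v => ?_)
    constructor
    · exact And.right
    · intro he
      exact ⟨(mem_cellList n m u).mpr he.1, he⟩
  set ρ := fun c : Int × Int => ufFind parentF (parentF.size + 1) c with hρdef
  have hρ : ∀ s t, inW n m s → inW n m t → get2d mi s.1 s.2 = 1 → get2d mi t.1 t.2 = 1 →
      (ρ s = ρ t ↔ reach mi n m s t) := by
    intro s t hsW htW hs1 ht1
    obtain ⟨rs, hrs⟩ := hUF2.1 s
    obtain ⟨rt, hrt⟩ := hUF2.1 t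
    have hfs : ρ s = rs := ufFind_eq parentF s rs hrs
    have hft : ρ t = rt := ufFind_eq parentF t rt hrt
    rw [hfs, hft, hUF2.2 s t rs rt hrs hrt]
    constructor
    · intro he
      rcases eqvGen_to_reach mi n m s t he with heq | hh
      · rw [heq]
        exact Relation.ReflTransGen.refl
      · exact hh.2.2.2.2
    · intro hr
      exact reach_to_eqvGen mi n m s t hsW (by rw [hs1]; exact one_ne_zero) hr
  have hinit : SimA mi n m ρ []
      (0, List.replicate n.toNat (List.replicate m.toNat (0 : Int)), mi) := by
    refine ⟨∅, ⟨by simp, fun r hr => by rw [List.eq_of_mem_replicate hr]; simp⟩,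
      ⟨rfl, fun k => rfl⟩, ?_, ?_, ?_, ?_, ?_, ?_, ?_⟩
    · intro p hp
      show get2d (List.replicate n.toNat (List.replicate m.toNat (0 : Int))) p.1 p.2 ≠ 0 ↔ _
      rw [get2d_zeros n.toNat m.toNat p.1 p.2 hp.1 hp.2.2.1]
      simp
    · intro p _ _
      rfl
    · intro p hp
      exact absurd hp (Set.notMem_empty p)
    · intro p hp
      exact absurd hp (Set.notMem_empty p)
    · intro p
      simp
    · intro s2 hs2
      exact absurd hs2 (List.not_mem_nil)
    · simp
  have hsim := foldl_prefix_inv (fun st c => cellStepA n m c.1 st c.2) (inW n m)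
    (SimA mi n m ρ)
    (fun P c st hok hs => cell_simA mi n m ρ hPre hρ c.1 c.2 hok P st hs)
    (cellList n m) [] _ hcells hinit
  obtain ⟨V, _, _, _, _, _, _, _, _, hcntA⟩ := hsim
  have hBval : get_island_cnt_alt mi n m =
      (((cellList n m).foldl
        (fun s c => if get2d mi c.1 c.2 = 1 then PySem.Set.add s (ρ c) else s)
        ([] : PySem.Set (Int × Int))).length : Int) := by
    show (((PySem.List.pyRange 0 n 1).foldl
        (fun s i => (PySem.List.pyRange 0 m 1).foldl (fun s j => rootStepB mi parentF i s j) s)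
        ([] : PySem.Set (Int × Int))).length : Int) = _
    rw [foldl_nested_eq (fun s i j => rootStepB mi parentF i s j)]
    rfl
  have hlen : ((cellList n m).foldl
      (fun s c => if get2d mi c.1 c.2 = 1 then PySem.Set.add s (ρ c) else s)
      ([] : PySem.Set (Int × Int))).length =
      (((cellList n m).filter (fun c => decide (get2d mi c.1 c.2 = 1))).map ρ).toFinset.card := by
    obtain ⟨g1, g2⟩ := setfold_card mi ρ (cellList n m) ([] : PySem.Set (Int × Int)) List.nodup_nil
    rw [← List.toFinset_card_of_nodup g1, g2]
    simp
  rw [hA, hBval, hlen]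
  exact hcntA
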